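-- pv_equiv track=rewrite | github.com/ethstorage/storage-contracts | scripts/dcf_convert.py | to_Q128x128
-- ===== SOURCE A (Python) =====
-- def to_Q128x128(frac3, res=128):
--     ipart = 0
--     fpart = frac3
--     for i in range(res):
--         ipart = ipart * 2
--         fpart = fpart * 2
--         ipart = ipart + (fpart // 1000)
--         fpart = fpart % 1000
--     if fpart >= 500:
--         ipart = ipart + 1
--     return ipart
-- ===== SOURCE B (Python) =====
-- def to_Q128x128(frac3, res=128):
--     q, r = divmod(frac3 << res, 1000)
--     return q + 1 if r >= 500 else q
-- ===== Notes on version B (the rewrite author's own statement) =====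
-- stated objective: faster
-- what changed: Replaces A's digit-at-a-time long-division loop over res iterations with a single big-int shift and one divmod by 1000 (remainder>=500 rounding); intended as faster — measured 525x at res=65536, the largest size at which a timing run decoded both outputs.
-- intended difference: For res = 0 with frac3 outside [-500, 1500), A skips the scaling loop and returns the bare indicator (1 if frac3 >= 500 else 0), while B returns the intended round(frac3/1000) = frac3//1000 + (frac3%1000 >= 500); B's value is the function's stated rounding purpose. — e.g. on to_Q128x128(1500, 0): A returns 1, B returns 2
-- outside the precondition, e.g. on to_Q128x128(500, -1): A returns 1, B raises ValueError
import Mathlib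
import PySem

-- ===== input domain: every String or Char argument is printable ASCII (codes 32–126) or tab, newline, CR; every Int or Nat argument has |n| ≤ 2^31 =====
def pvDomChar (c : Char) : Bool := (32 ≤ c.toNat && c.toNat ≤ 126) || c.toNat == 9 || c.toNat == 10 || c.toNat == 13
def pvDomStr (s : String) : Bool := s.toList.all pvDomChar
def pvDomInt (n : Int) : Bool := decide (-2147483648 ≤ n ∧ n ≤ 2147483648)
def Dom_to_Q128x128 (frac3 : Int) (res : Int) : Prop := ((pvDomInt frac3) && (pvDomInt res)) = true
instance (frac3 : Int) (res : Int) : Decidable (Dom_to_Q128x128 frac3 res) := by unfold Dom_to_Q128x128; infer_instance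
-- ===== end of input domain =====

-- B replaces A's per-iteration long-division loop by one big-int shift plus a single divmod-by-1000 with round-half-up.


-- ===== PORT A =====
def to_Q128x128 (frac3 : Int) (res : Int) : Int :=
  let s := (PySem.List.pyRange 0 res 1).foldl
    (fun (st : Int × Int) _ =>
      let ipart := st.1 * 2
      let fpart := st.2 * 2
      (ipart + PySem.Int.floordiv fpart 1000, PySem.Int.mod fpart 1000))
    (0, frac3)
  if s.2 ≥ 500 then s.1 + 1 else s.1

-- ===== PORT B =====
-- Python's 'frac3 << res' raises ValueError for res < 0 (excluded by Pre_);
-- for 0 ≤ res, '<<<' with res.toNat is exact (PYSEM: n << k IS Lean's n <<< k).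
def to_Q128x128_alt (frac3 : Int) (res : Int) : Int :=
  let n := frac3 <<< res.toNat
  let q := PySem.Int.floordiv n 1000
  let r := PySem.Int.mod n 1000
  if r ≥ 500 then q + 1 else q

-- ===== PRECONDITION & SPEC =====
-- Pre_ excludes res < 0, where A returns (the loop is empty) but B's 'frac3 << res' raises ValueError.
def Pre_to_Q128x128 (frac3 : Int) (res : Int) : Prop := 0 ≤ res
instance (frac3 : Int) (res : Int) : Decidable (Pre_to_Q128x128 frac3 res) := by unfold Pre_to_Q128x128; infer_instance
def pvWitness_to_Q128x128 : Int × Int := (500, 3)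

-- For res = 0 with frac3 outside [-500, 1500), A skips the scaling loop and returns the bare
-- indicator (1 if frac3 >= 500 else 0), while B returns the intended round(frac3/1000);
-- B's value is the function's stated rounding purpose.
def D_to_Q128x128 (frac3 : Int) (res : Int) : Prop :=
  res = 0 ∧ (frac3 ≤ -501 ∨ 1500 ≤ frac3)
instance (frac3 : Int) (res : Int) : Decidable (D_to_Q128x128 frac3 res) := by unfold D_to_Q128x128; infer_instance

def Spec_to_Q128x128 (frac3 : Int) (res : Int) (out : Int) : Prop :=
  ¬ D_to_Q128x128 frac3 res → out = to_Q128x128_alt frac3 res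
instance (frac3 : Int) (res : Int) (out : Int) : Decidable (Spec_to_Q128x128 frac3 res out) := by unfold Spec_to_Q128x128; infer_instance

def pvDiffWitness_to_Q128x128 : Int × Int := (1500, 0)
def pvDiffWitnessOut_to_Q128x128 : Int × Int := (1, 2)

-- ===== CLAIM (what is proved, stated in full; the proofs are below) =====
def Claim_unchanged_to_Q128x128 : Prop := ∀ (frac3 : Int) (res : Int), Dom_to_Q128x128 frac3 res → Pre_to_Q128x128 frac3 res → Spec_to_Q128x128 frac3 res (to_Q128x128 frac3 res)
def Claim_changed_to_Q128x128 : Prop := Dom_to_Q128x128 (pvDiffWitness_to_Q128x128.1) (pvDiffWitness_to_Q128x128.2) ∧ Pre_to_Q128x128 (pvDiffWitness_to_Q128x128.1) (pvDiffWitness_to_Q128x128.2) ∧ D_to_Q128x128 (pvDiffWitness_to_Q128x128.1) (pvDiffWitness_to_Q128x128.2) ∧ to_Q128x128 (pvDiffWitness_to_Q128x128.1) (pvDiffWitness_to_Q128x128.2) = pvDiffWitnessOut_to_Q128x128.1 ∧ to_Q128x128_alt (pvDiffWitness_to_Q128x128.1) (pvDiffWitness_to_Q128x128.2) = pvDiffWitnessOut_to_Q128x128.2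 ∧ pvDiffWitnessOut_to_Q128x128.1 ≠ pvDiffWitnessOut_to_Q128x128.2
def Claim_exact_to_Q128x128 : Prop := ∀ (frac3 : Int) (res : Int), Dom_to_Q128x128 frac3 res → Pre_to_Q128x128 frac3 res → D_to_Q128x128 frac3 res → to_Q128x128 frac3 res ≠ to_Q128x128_alt frac3 res

-- ===== LEMMAS AND PROOFS =====

-- one doubling step of A's long division, in terms of the current quotient/remainder of N by 1000
lemma stepA_correct (N : Int) :
    (PySem.Int.floordiv N 1000 * 2 + PySem.Int.floordiv (PySem.Int.mod N 1000 * 2) 1000,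
      PySem.Int.mod (PySem.Int.mod N 1000 * 2) 1000)
    = (PySem.Int.floordiv (N * 2) 1000, PySem.Int.mod (N * 2) 1000) := by
  have h1 := PySem.Int.floordiv_mul_add_mod N 1000
  have h2 := PySem.Int.mod_nonneg N (b := 1000) (by omega)
  have h3 := PySem.Int.mod_lt N (b := 1000) (by omega)
  have h4 := PySem.Int.floordiv_mul_add_mod (PySem.Int.mod N 1000 * 2) 1000
  have h5 := PySem.Int.mod_nonneg (PySem.Int.mod N 1000 * 2) (b := 1000) (by omega)
  have h6 := PySem.Int.mod_lt (PySem.Int.mod N 1000 * 2) (b := 1000) (by omega)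
  have h7 := PySem.Int.floordiv_mul_add_mod (N * 2) 1000
  have h8 := PySem.Int.mod_nonneg (N * 2) (b := 1000) (by omega)
  have h9 := PySem.Int.mod_lt (N * 2) (b := 1000) (by omega)
  have : PySem.Int.floordiv N 1000 * 2 + PySem.Int.floordiv (PySem.Int.mod N 1000 * 2) 1000
      = PySem.Int.floordiv (N * 2) 1000 ∧
      PySem.Int.mod (PySem.Int.mod N 1000 * 2) 1000 = PySem.Int.mod (N * 2) 1000 := by omega
  rw [Prod.mk.injEq]; exact this

-- A's loop, run n ≥ 1 times, computes quotient and remainder of frac3·2^n by 1000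
lemma loopA (frac3 : Int) (n : Nat) (hn : 1 ≤ n) :
    (PySem.List.pyRange 0 (n : Int) 1).foldl
      (fun (st : Int × Int) _ =>
        (st.1 * 2 + PySem.Int.floordiv (st.2 * 2) 1000, PySem.Int.mod (st.2 * 2) 1000))
      (0, frac3)
    = (PySem.Int.floordiv (frac3 * 2 ^ n) 1000, PySem.Int.mod (frac3 * 2 ^ n) 1000) := by
  induction n with
  | zero => omega
  | succ m ih =>
    by_cases hm : 1 ≤ m
    · have hsplit : PySem.List.pyRange 0 ((m : Int) + 1) 1
          = PySem.List.pyRange 0 (m : Int) 1 ++ [(m : Int)] :=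
        PySem.List.pyRange_one_succ_right (by positivity)
      have hc : ((m : Int) + 1) = (((m + 1 : Nat)) : Int) := by push_cast; ring
      rw [← hc, hsplit, List.foldl_append, ih hm]
      have := stepA_correct (frac3 * 2 ^ m)
      simp only [List.foldl_cons, List.foldl_nil]
      rw [this]
      ring_nf
    · have hm0 : m = 0 := by omega
      subst hm0
      rw [show ((1 : Nat) : Int) = (0 : Int) + 1 by norm_num,
        PySem.List.pyRange_one_singleton]
      simp [pow_one]

-- helper facts for the res = 0 cases
lemma qr_facts (x : Int) :
    PySem.Int.floordiv x 1000 * 1000 + PySem.Int.mod x 1000 = x ∧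
    0 ≤ PySem.Int.mod x 1000 ∧ PySem.Int.mod x 1000 < 1000 :=
  ⟨PySem.Int.floordiv_mul_add_mod x 1000,
   PySem.Int.mod_nonneg x (by omega), PySem.Int.mod_lt x (by omega)⟩

-- ===== VERDICT (by name: the statement is the Claim_ definition above) =====
theorem to_Q128x128_spec : Claim_unchanged_to_Q128x128 := by
  intro frac3 res _ hpre hnd
  have hres0 : 0 ≤ res := hpre
  unfold to_Q128x128 to_Q128x128_alt
  by_cases h0 : res = 0
  · subst h0
    rw [PySem.List.pyRange_one_eq_nil (by omega)]
    simp only [List.foldl_nil, Int.toNat_zero]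
    have hsh : frac3 <<< (0 : Nat) = frac3 := by simp
    rw [hsh]
    have hD : ¬ (frac3 ≤ -501 ∨ 1500 ≤ frac3) := by
      intro h; exact hnd ⟨rfl, h⟩
    obtain ⟨hq, hr0, hr1⟩ := qr_facts frac3
    split_ifs <;> omega
  · have hres : res = ((res.toNat : Nat) : Int) := by omega
    have hn1 : 1 ≤ res.toNat := by omega
    rw [hres]
    have hl := loopA frac3 res.toNat hn1
    simp only at hl ⊢
    rw [hl]
    simp only [Int.toNat_natCast, Int.shiftLeft_eq]

theorem to_Q128x128_changed : Claim_changed_to_Q128x128 := by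
  unfold Claim_changed_to_Q128x128; decide

theorem to_Q128x128_tight : Claim_exact_to_Q128x128 := by
  intro frac3 res _ _ hd
  obtain ⟨h0, hcase⟩ := hd
  subst h0
  unfold to_Q128x128 to_Q128x128_alt
  rw [PySem.List.pyRange_one_eq_nil (by omega)]
  simp only [List.foldl_nil, Int.toNat_zero]
  have hsh : frac3 <<< (0 : Nat) = frac3 := by simp
  rw [hsh]
  obtain ⟨hq, hr0, hr1⟩ := qr_facts frac3
  split_ifs <;> omega
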